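-- pv_equiv track=rewrite | github.com/HiBorn4/Radio | oct16.py | synchronize_data
-- ===== SOURCE A (Python) =====
-- def synchronize_data(digital_values, clock_signal):
--     synchronized_data = []
--     data_index = 0
--     for clock_pulse in clock_signal:
--         if clock_pulse:
--             synchronized_data.append(digital_values[data_index])
--             data_index += 1
--     return synchronized_data
-- ===== SOURCE B (Python) =====
-- def synchronize_data(digital_values, clock_signal):
--     k = sum(1 for p in clock_signal if p)
--     return [digital_values[i] for i in range(k)]
-- ===== Notes on version B (the rewrite author's own statement) =====
-- stated objective: simpler
-- what changed: B first counts the truthy clock pulses in one pass, then fetches that many leading elements of digital_values by index in a second pass, instead of interleaving the branch and the append inside one loop with a running index.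
import Mathlib
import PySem

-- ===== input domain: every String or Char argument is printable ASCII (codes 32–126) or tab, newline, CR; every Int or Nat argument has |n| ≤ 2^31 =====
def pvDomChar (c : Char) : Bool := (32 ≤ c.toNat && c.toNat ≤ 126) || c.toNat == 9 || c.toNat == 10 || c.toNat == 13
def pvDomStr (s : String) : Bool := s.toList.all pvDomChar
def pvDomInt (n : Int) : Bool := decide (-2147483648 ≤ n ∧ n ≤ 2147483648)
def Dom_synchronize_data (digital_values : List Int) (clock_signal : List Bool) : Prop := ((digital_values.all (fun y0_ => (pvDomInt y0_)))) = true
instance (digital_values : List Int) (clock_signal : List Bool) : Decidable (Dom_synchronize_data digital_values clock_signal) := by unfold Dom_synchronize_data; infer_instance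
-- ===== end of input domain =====

-- B separates counting the truthy pulses from an index-driven retrieval of the leading
-- elements, replacing A's single interleaved loop; same behaviour, simpler decomposition.
-- ===== PORT A =====
def synchronize_data (digital_values : List Int) (clock_signal : List Bool) : List Int :=
  -- synchronized_data = []; data_index = 0; for clock_pulse in clock_signal: …
  (clock_signal.foldl
    (fun (st : List Int × Int) clock_pulse =>
      if clock_pulse then
        -- digital_values[data_index] is in range under Pre_; pyGetD is exact there
        (st.1 ++ [PySem.List.pyGetD digital_values st.2 0], st.2 + 1)
      else st)
    ([], 0)).1

-- ===== PORT B =====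
def synchronize_data_alt (digital_values : List Int) (clock_signal : List Bool) : List Int :=
  -- k = sum(1 for p in clock_signal if p)
  let k : Int := clock_signal.foldl (fun a p => if p then a + 1 else a) 0
  -- [digital_values[i] for i in range(k)]  (in range under Pre_; pyGetD exact there)
  (PySem.List.pyRange 0 k 1).map (fun i => PySem.List.pyGetD digital_values i 0)

-- ===== PRECONDITION & SPEC =====
-- Pre_ excludes exactly the inputs where Python A raises IndexError: more truthy clock
-- pulses than there are digital values.
def Pre_synchronize_data (digital_values : List Int) (clock_signal : List Bool) : Prop :=
  clock_signal.count true ≤ digital_values.length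
instance (digital_values : List Int) (clock_signal : List Bool) : Decidable (Pre_synchronize_data digital_values clock_signal) := by unfold Pre_synchronize_data; infer_instance
def pvWitness_synchronize_data : List Int × List Bool := ([3, -1, 7], [true, false, true])

def Spec_synchronize_data (digital_values : List Int) (clock_signal : List Bool) (out : List Int) : Prop := out = synchronize_data_alt digital_values clock_signal
instance (digital_values : List Int) (clock_signal : List Bool) (out : List Int) : Decidable (Spec_synchronize_data digital_values clock_signal out) := by unfold Spec_synchronize_data; infer_instance

-- ===== CLAIM (what is proved, stated in full; the proofs are below) =====
def Claim_equal_synchronize_data : Prop := ∀ (digital_values : List Int) (clock_signal : List Bool), Dom_synchronize_data digital_values clock_signal → Pre_synchronize_data digital_values clock_signal → Spec_synchronize_data digital_values clock_signal (synchronize_data digital_values clock_signal)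

-- ===== LEMMAS AND PROOFS =====

-- A's loop, started at any accumulator and index, produces the map over the index range.
theorem pv_loopA (dv : List Int) : ∀ (cs : List Bool) (acc : List Int) (n : Int),
    cs.foldl
      (fun (st : List Int × Int) p =>
        if p then (st.1 ++ [PySem.List.pyGetD dv st.2 0], st.2 + 1) else st)
      (acc, n)
    = (acc ++ (PySem.List.pyRange n (n + (cs.countP id : Int)) 1).map
          (fun i => PySem.List.pyGetD dv i 0),
       n + (cs.countP id : Int)) := by
  intro cs
  induction cs with
  | nil =>
    intro acc n
    simp [PySem.List.pyRange_one_eq_nil (le_refl n)]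
  | cons p cs ih =>
    intro acc n
    rw [List.foldl_cons]
    cases p with
    | true =>
      have hc : ((true :: cs).countP id : Int) = (cs.countP id : Int) + 1 := by simp
      rw [show (if true then ((acc, n).1 ++ [PySem.List.pyGetD dv (acc, n).2 0], (acc, n).2 + 1) else (acc, n)) = (acc ++ [PySem.List.pyGetD dv n 0], n + 1) from rfl]
      rw [ih, hc]
      have hr : PySem.List.pyRange n (n + ((cs.countP id : Int) + 1)) 1
          = n :: PySem.List.pyRange (n + 1) (n + ((cs.countP id : Int) + 1)) 1 :=
        PySem.List.pyRange_one_cons (by omega)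
      rw [hr]
      have hb : n + ((cs.countP id : Int) + 1) = n + 1 + (cs.countP id : Int) := by ring
      rw [hb]
      simp
    | false =>
      have hc : ((false :: cs).countP id : Int) = (cs.countP id : Int) := by simp
      rw [show (if false then ((acc, n).1 ++ [PySem.List.pyGetD dv (acc, n).2 0], (acc, n).2 + 1) else (acc, n)) = (acc, n) from rfl]
      rw [ih, hc]

-- B's counting pass is List.countP, from any starting value.
theorem pv_countB : ∀ (cs : List Bool) (s : Int),
    cs.foldl (fun a p => if p then a + 1 else a) s = s + (cs.countP id : Int) := by
  intro cs
  induction cs with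
  | nil => intro s; simp
  | cons p cs ih =>
    intro s
    cases p <;> simp [ih] <;> ring

-- ===== VERDICT (by name: the statement is the Claim_ definition above) =====
theorem synchronize_data_spec : Claim_equal_synchronize_data := by
  intro dv cs _ _
  unfold Spec_synchronize_data synchronize_data synchronize_data_alt
  rw [pv_loopA, pv_countB]
  simp
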